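-- pv_equiv track=rewrite | github.com/Atthis/spythoon | src/server/utils.py | updatePossession
-- ===== SOURCE A (Python) =====
-- def updatePossession(map:[[int]]) -> tuple[int, int]:
--     team1Possession = 0
--     team2Possession = 0
--     for row in map :
--         for tileValue in row:
--             match tileValue:
--                 case 1:
--                     # team1Possession, team1Score = updateScore(team1Possession, team1Score, map)
--                     team1Possession += 1
--                 case 2:
--                     # team2Possession, team2Score = updateScore(team2Possession, team2Score, map)
--                     team2Possession += 1
--     return (team1Possession, team2Possession)
-- ===== SOURCE B (Python) =====
-- def updatePossession(map:[[int]]) -> tuple[int, int]: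
--     team1Possession = sum(row.count(1) for row in map)
--     team2Possession = sum(row.count(2) for row in map)
--     return (team1Possession, team2Possession)
-- ===== Notes on version B (the rewrite author's own statement) =====
-- stated objective: idiomatic
-- what changed: Replaces the fused nested loop with match-based accumulators by two independent aggregations, one sum of row.count per target value.
import Mathlib
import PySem

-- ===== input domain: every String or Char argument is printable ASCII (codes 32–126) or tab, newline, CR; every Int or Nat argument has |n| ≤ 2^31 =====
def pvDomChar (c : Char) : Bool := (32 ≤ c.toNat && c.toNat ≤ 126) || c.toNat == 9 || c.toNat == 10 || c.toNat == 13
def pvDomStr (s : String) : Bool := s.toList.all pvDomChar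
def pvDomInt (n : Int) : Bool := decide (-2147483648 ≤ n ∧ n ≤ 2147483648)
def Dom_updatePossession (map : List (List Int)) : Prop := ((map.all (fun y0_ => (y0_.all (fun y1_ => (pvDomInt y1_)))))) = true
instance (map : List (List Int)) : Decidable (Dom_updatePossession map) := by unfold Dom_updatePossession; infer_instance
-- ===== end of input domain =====

-- B replaces A's fused nested match-loop by two independent counts (sum of row.count per value); idiomatic, same cost.

-- ===== PORT A =====
-- nested for-loops with a match updating the (team1, team2) accumulator pair
def updatePossession (map : List (List Int)) : Int × Int :=
  map.foldl
    (fun acc row =>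
      row.foldl
        (fun acc tileValue =>
          match tileValue with
          | 1 => (acc.1 + 1, acc.2)
          | 2 => (acc.1, acc.2 + 1)
          | _ => acc)
        acc)
    (0, 0)

-- ===== PORT B =====
-- team1Possession = sum(row.count(1) for row in map); likewise for 2
def updatePossession_alt (map : List (List Int)) : Int × Int :=
  ((map.map (fun row => (PySem.List.count row 1 : Int))).sum,
   (map.map (fun row => (PySem.List.count row 2 : Int))).sum)

-- ===== PRECONDITION & SPEC =====
def Spec_updatePossession (map : List (List Int)) (out : Int × Int) : Prop := out = updatePossession_alt map
instance (map : List (List Int)) (out : Int × Int) : Decidable (Spec_updatePossession map out) := by unfold Spec_updatePossession; infer_instance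

-- ===== CLAIM (what is proved, stated in full; the proofs are below) =====
def Claim_equal_updatePossession : Prop := ∀ (map : List (List Int)), Dom_updatePossession map → Spec_updatePossession map (updatePossession map)

-- ===== LEMMAS AND PROOFS =====
theorem pv_step_other (x a b : Int) :
    x ≠ 1 → x ≠ 2 →
    (match x with
      | 1 => (a + 1, b)
      | 2 => (a, b + 1)
      | _ => (a, b)) = (a, b) := by
  intro h1 h2
  split <;> simp_all

theorem pv_row_fold (row : List Int) (a b : Int) :
    row.foldl
      (fun acc tileValue =>
        match tileValue with
        | 1 => (acc.1 + 1, acc.2)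
        | 2 => (acc.1, acc.2 + 1)
        | _ => acc)
      (a, b)
    = (a + (row.count 1 : Int), b + (row.count 2 : Int)) := by
  induction row generalizing a b with
  | nil => simp
  | cons x xs ih =>
    simp only [List.foldl_cons]
    by_cases h1 : x = 1
    · subst h1
      rw [ih]
      simp [Prod.mk.injEq]
      omega
    · by_cases h2 : x = 2
      · subst h2
        rw [ih]
        simp [Prod.mk.injEq]
        omega
      · rw [pv_step_other x a b h1 h2, ih]
        simp [h1, h2]

theorem pv_main (map : List (List Int)) (a b : Int) :
    map.foldl
      (fun acc row =>
        row.foldl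
          (fun acc tileValue =>
            match tileValue with
            | 1 => (acc.1 + 1, acc.2)
            | 2 => (acc.1, acc.2 + 1)
            | _ => acc)
          acc)
      (a, b)
    = (a + ((map.map (fun row => (PySem.List.count row 1 : Int))).sum),
       b + ((map.map (fun row => (PySem.List.count row 2 : Int))).sum)) := by
  induction map generalizing a b with
  | nil => simp
  | cons r rs ih =>
    simp only [List.foldl_cons, pv_row_fold, ih, List.map_cons, List.sum_cons,
      PySem.List.count_eq, Prod.mk.injEq]
    constructor <;> ring

-- ===== VERDICT (by name: the statement is the Claim_ definition above) =====
theorem updatePossession_spec : Claim_equal_updatePossession := by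
  intro map _
  unfold Spec_updatePossession updatePossession updatePossession_alt
  rw [pv_main]
  simp
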